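-- pv_equiv track=rewrite | github.com/MonikaChris/advent-code | dec-2023/Day11/day11_part2.py | sub_nums
-- ===== SOURCE A (Python) =====
-- def sub_nums(uni):
--   ROWS = len(uni)
--   COLS = len(uni[0])
--   count = 1
--
--   for r in range(ROWS):
--     for c in range(COLS):
--       if uni[r][c] == '#':
--         uni[r][c] = str(count)
--         count += 1
--   return count - 1
-- ===== SOURCE B (Python) =====
-- def sub_nums(uni):
--     label = 0
--     for row in uni:
--         for _ in range(row.count('#')):
--             i = row.index('#')
--             label += 1
--             row[i] = str(label)
--     return label
-- ===== Notes on version B (the rewrite author's own statement) =====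
-- stated objective: alternative
-- what changed: B drops the coordinate double loop entirely: per row it takes row.count('#') once and then repeatedly finds the next '#' with row.index and overwrites it, so the counter is a plain running label and cells that are not '#' are never visited by the replacement loop.
-- intended difference: On ragged grids where some row has a '#' at a column index >= len(uni[0]), A silently ignores those cells because it only scans range(len(uni[0])) columns and returns the truncated count, while B numbers and counts every '#' in every row, which is the intended behaviour of labelling all galaxy cells. — e.g. on sub_nums([["#"], [".", "#"]]): A returns 1, B returns 2
import Mathlib
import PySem

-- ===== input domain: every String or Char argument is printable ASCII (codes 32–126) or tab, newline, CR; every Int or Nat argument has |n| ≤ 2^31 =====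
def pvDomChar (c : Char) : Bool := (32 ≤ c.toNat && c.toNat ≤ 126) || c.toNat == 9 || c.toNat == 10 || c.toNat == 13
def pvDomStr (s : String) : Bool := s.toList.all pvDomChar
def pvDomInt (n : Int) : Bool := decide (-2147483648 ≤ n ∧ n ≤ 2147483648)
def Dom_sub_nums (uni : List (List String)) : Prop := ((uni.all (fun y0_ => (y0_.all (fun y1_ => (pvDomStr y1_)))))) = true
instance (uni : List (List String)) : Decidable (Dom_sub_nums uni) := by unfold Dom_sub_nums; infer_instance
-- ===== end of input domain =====

-- B replaces the coordinate double loop with per-row count-then-repeated-index-search-and-replace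
-- (objective: alternative, same cost). Both A and B mutate the grid argument in place; the
-- equivalence proved here is about the RETURN value only.

-- ===== PORT A =====
-- inner loop body: reads uni[r][c]; pyGetD's default "" is exact under Pre_ (indices in range there)
def aInner (r : Int) (st : List (List String) × Int) (c : Int) : List (List String) × Int :=
  if PySem.List.pyGetD (PySem.List.pyGetD st.1 r []) c "" == "#" then
    (PySem.List.pySetD st.1 r
       (PySem.List.pySetD (PySem.List.pyGetD st.1 r []) c (PySem.Int.toStr st.2)), st.2 + 1)
  else st

def sub_nums (uni : List (List String)) : Int :=
  let ROWS : Int := uni.length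
  let COLS : Int := (PySem.List.pyGetD uni 0 []).length  -- len(uni[0]); exact under Pre_ (uni ≠ [])
  let st := (PySem.List.pyRange 0 ROWS 1).foldl
      (fun st r => (PySem.List.pyRange 0 COLS 1).foldl (aInner r) st) (uni, (1 : Int))
  st.2 - 1

-- ===== PORT B =====
-- inner loop of Source B: 'for _ in range(row.count("#")): i = row.index("#"); label += 1; row[i] = str(label)'
-- (row.index can never raise here — each pass removes one '#' — so the none branch is unreachable)
def bRow : Nat → List String → Int → List String × Int
  | 0, row, label => (row, label)
  | k + 1, row, label =>
    match PySem.List.index? row "#" with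
    | some i => bRow k (row.set i (PySem.Int.toStr (label + 1))) (label + 1)
    | none => (row, label)

def sub_nums_alt (uni : List (List String)) : Int :=
  uni.foldl (fun label row => (bRow (PySem.List.count row "#") row label).2) 0

-- ===== PRECONDITION & SPEC =====
-- Pre_ excludes exactly the inputs where Python A raises IndexError: the empty grid (uni[0]) and
-- grids with a row shorter than the first row (uni[r][c] out of range).
def Pre_sub_nums (uni : List (List String)) : Prop :=
  uni ≠ [] ∧ ∀ row ∈ uni, (uni.headD []).length ≤ row.length
instance (uni : List (List String)) : Decidable (Pre_sub_nums uni) := by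
  unfold Pre_sub_nums; infer_instance

def pvWitness_sub_nums : List (List String) := [["#", "."], [".", "#"]]

-- On ragged grids where some row has a '#' beyond column len(uni[0])-1, A only scans
-- range(len(uni[0])) columns and returns the truncated count, while B numbers and counts every
-- '#' in every row — the intended behaviour of labelling all galaxy cells.
def D_sub_nums (uni : List (List String)) : Prop :=
  ∃ row ∈ uni, "#" ∈ row.drop (uni.headD []).length
instance (uni : List (List String)) : Decidable (D_sub_nums uni) := by
  unfold D_sub_nums; infer_instance

def Spec_sub_nums (uni : List (List String)) (out : Int) : Prop :=
  ¬ D_sub_nums uni → out = sub_nums_alt uni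
instance (uni : List (List String)) (out : Int) : Decidable (Spec_sub_nums uni out) := by
  unfold Spec_sub_nums; infer_instance

def pvDiffWitness_sub_nums : List (List String) := [["#"], [".", "#"]]
def pvDiffWitnessOut_sub_nums : Int × Int := (1, 2)

-- ===== CLAIM (what is proved, stated in full; the proofs are below) =====
def Claim_unchanged_sub_nums : Prop :=
  ∀ (uni : List (List String)), Dom_sub_nums uni → Pre_sub_nums uni →
    Spec_sub_nums uni (sub_nums uni)
def Claim_changed_sub_nums : Prop :=
  Dom_sub_nums (pvDiffWitness_sub_nums) ∧ Pre_sub_nums (pvDiffWitness_sub_nums) ∧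
    D_sub_nums (pvDiffWitness_sub_nums) ∧
    sub_nums (pvDiffWitness_sub_nums) = pvDiffWitnessOut_sub_nums.1 ∧
    sub_nums_alt (pvDiffWitness_sub_nums) = pvDiffWitnessOut_sub_nums.2 ∧
    pvDiffWitnessOut_sub_nums.1 ≠ pvDiffWitnessOut_sub_nums.2
def Claim_exact_sub_nums : Prop :=
  ∀ (uni : List (List String)), Dom_sub_nums uni → Pre_sub_nums uni → D_sub_nums uni →
    sub_nums uni ≠ sub_nums_alt uni

-- ===== LEMMAS AND PROOFS =====

-- reads through equal suffixes agree
theorem getD_eq_of_drop_eq {α : Type} [Inhabited α] (l₁ l₂ : List α) (a : Nat) (d : α)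
    (h : l₁.drop a = l₂.drop a) : l₁.getD a d = l₂.getD a d := by
  simp only [List.getD_eq_getElem?_getD]
  have h1 : l₁[a]? = (l₁.drop a)[0]? := by simp [List.getElem?_drop]
  have h2 : l₂[a]? = (l₂.drop a)[0]? := by simp [List.getElem?_drop]
  rw [h1, h2, h]

-- inner loop of A over columns a, a+1, …, a+n-1 of row r: the count grows by the number of '#'
-- among those columns of the ORIGINAL row, and rows other than r are untouched.
theorem aInner_loop (n : Nat) : ∀ (a : Nat) (g : List (List String)) (r : Nat)
    (orig : List String) (cnt : Int),
    (g.getD r []).drop a = orig.drop a →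
    (((List.range' a n).map Int.ofNat).foldl (aInner (r : Int)) (g, cnt)).2
        = cnt + ((((orig.drop a).take n).count "#" : Nat) : Int)
    ∧ ∀ r' : Nat, r' ≠ r →
      (((List.range' a n).map Int.ofNat).foldl (aInner (r : Int)) (g, cnt)).1.getD r' []
        = g.getD r' [] := by
  induction n with
  | zero => intro a g r orig cnt _; simp
  | succ n ih =>
    intro a g r orig cnt h
    have hread : (g.getD r []).getD a "" = orig.getD a "" := getD_eq_of_drop_eq _ _ a "" h
    have hdrop : ∀ (l : List String), l.drop (a + 1) = (l.drop a).drop 1 := by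
      intro l; rw [List.drop_drop]
    rw [List.range'_succ, List.map_cons, List.foldl_cons]
    simp only [Int.ofNat_eq_natCast]
    by_cases hc : orig.getD a "" = "#"
    · -- '#' branch: a write happens at (r, a)
      have hgl : (g.getD r []).getD a "" = "#" := by rw [hread, hc]
      have hgl2 : (g[r]?.getD [])[a]?.getD "" = "#" := by
        simpa [List.getD_eq_getElem?_getD] using hgl
      have hstep : aInner (r : Int) (g, cnt) (a : Int)
          = (g.set r ((g.getD r []).set a (PySem.Int.toStr cnt)), cnt + 1) := by
        simp [aInner, hgl2, List.getD_eq_getElem?_getD]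
      rw [hstep]
      have hr_lt : r < g.length := by
        by_contra hge
        have : g.getD r [] = [] := by
          simp [List.getD_eq_getElem?_getD, List.getElem?_eq_none (by omega : g.length ≤ r)]
        rw [this] at hgl; simp [List.getD] at hgl
      have hgetset : (g.set r ((g.getD r []).set a (PySem.Int.toStr cnt))).getD r []
          = (g.getD r []).set a (PySem.Int.toStr cnt) := by
        simp [List.getD_eq_getElem?_getD, List.getElem?_set_self' ,
              List.getElem?_eq_getElem hr_lt]
      have hsuffix : ((g.getD r []).set a (PySem.Int.toStr cnt)).drop (a + 1)
          = orig.drop (a + 1) := by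
        rw [List.drop_set]; simp only [show a < a + 1 by omega, if_pos]
        rw [hdrop (g.getD r []), hdrop orig, h]
      have ihres := ih (a + 1) (g.set r ((g.getD r []).set a (PySem.Int.toStr cnt))) r orig
          (cnt + 1) (by rw [hgetset]; exact hsuffix)
      -- head of orig.drop a is "#"
      have ha_lt : a < orig.length := by
        by_contra hge
        have : orig.getD a "" = "" := by
          simp [List.getD_eq_getElem?_getD, List.getElem?_eq_none (by omega : orig.length ≤ a)]
        rw [this] at hc; exact absurd hc (by decide)
      have hcons : orig.drop a = "#" :: orig.drop (a + 1) := by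
        have h1 := List.getElem_cons_drop (as := orig) (i := a) ha_lt
        have h2 : orig[a] = "#" := by
          rw [← List.getD_eq_getElem (l := orig) (d := "") ha_lt]; exact hc
        rw [← h1, h2]
      constructor
      · rw [ihres.1, hcons, List.take_succ_cons, List.count_cons]
        simp only [beq_self_eq_true, if_pos]
        push_cast
        ring
      · intro r' hne
        rw [ihres.2 r' hne]
        simp [List.getD_eq_getElem?_getD, List.getElem?_set_ne (by omega : r ≠ r')]
    · -- non-'#' branch: state unchanged
      have hgl : ¬ ((g.getD r []).getD a "" = "#") := by rw [hread]; exact hc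
      have hgl2 : ¬ ((g[r]?.getD [])[a]?.getD "" = "#") := by
        simpa [List.getD_eq_getElem?_getD] using hgl
      have hstep : aInner (r : Int) (g, cnt) (a : Int) = (g, cnt) := by
        simp [aInner, hgl2]
      rw [hstep]
      have ihres := ih (a + 1) g r orig cnt (by rw [hdrop (g.getD r []), hdrop orig, h])
      refine ⟨?_, ihres.2⟩
      rw [ihres.1]
      rcases Nat.lt_or_ge a orig.length with ha | ha
      · have hcons : orig.drop a = orig[a] :: orig.drop (a + 1) :=
          (List.getElem_cons_drop (as := orig) (i := a) ha).symm
        have hne : orig[a] ≠ "#" := by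
          have := List.getD_eq_getElem (l := orig) (d := "") ha
          rw [← this]; exact hc
        rw [hcons, List.take_succ_cons, List.count_cons]
        simp [hne]
      · have h1 : orig.drop a = [] := List.drop_eq_nil_of_le ha
        have h2 : orig.drop (a + 1) = [] := List.drop_eq_nil_of_le (by omega)
        rw [h1, h2]
        simp

-- outer loop of A over rows r0, …, r0+m-1 (= all remaining rows): the count grows by the total
-- number of '#' among the first n columns of the remaining ORIGINAL rows.
theorem aOuter_loop (orig : List (List String)) (n : Nat) (m : Nat) :
    ∀ (r0 : Nat) (g : List (List String)) (cnt : Int),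
    r0 + m = orig.length →
    (∀ r' : Nat, r0 ≤ r' → g.getD r' [] = orig.getD r' []) →
    (((List.range' r0 m).map Int.ofNat).foldl
        (fun st r => ((List.range' 0 n).map Int.ofNat).foldl (aInner r) st)
        (g, cnt)).2
      = cnt + (((orig.drop r0).map (fun row => (((row.take n).count "#" : Nat) : Int))).sum) := by
  induction m with
  | zero =>
    intro r0 g cnt hlen _
    simp [List.drop_eq_nil_of_le (by omega : orig.length ≤ r0)]
  | succ m ih =>
    intro r0 g cnt hlen hrows
    rw [List.range'_succ, List.map_cons, List.foldl_cons]
    simp only [Int.ofNat_eq_natCast]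
    have hr0 : r0 < orig.length := by omega
    have hrow : (g.getD r0 []).drop 0 = (orig.getD r0 []).drop 0 := by
      rw [hrows r0 (le_refl r0)]
    have hin := aInner_loop n 0 g r0 (orig.getD r0 []) cnt hrow
    set st1 := ((List.range' 0 n).map Int.ofNat).foldl (aInner (r0 : Int)) (g, cnt)
      with hst1
    have hihres := ih (r0 + 1) st1.1 st1.2 (by omega)
      (fun r' hr' => by
        rw [hin.2 r' (by omega)]; exact hrows r' (by omega))
    rw [Prod.mk.eta] at hihres
    rw [hihres, hin.1]
    have hcons : orig.drop r0 = orig[r0] :: orig.drop (r0 + 1) :=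
      (List.getElem_cons_drop (as := orig) (i := r0) hr0).symm
    have hgetd : orig.getD r0 [] = orig[r0] := List.getD_eq_getElem (l := orig) (d := []) hr0
    rw [hcons, hgetd]
    simp only [List.map_cons, List.sum_cons, List.drop_zero]
    ring

-- A's nested pyRange fold is the range' fold of the loop lemmas
theorem pyRange_map_range' (n : Nat) :
    PySem.List.pyRange 0 (n : Int) 1 = (List.range' 0 n).map Int.ofNat := by
  rw [PySem.List.pyRange_one]
  simp only [Int.sub_zero, Int.toNat_natCast, List.range_eq_range']
  apply List.map_congr_left
  intro k _
  simp [Int.ofNat_eq_natCast]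

-- A's port computes 1 + Σ per-row counts over the first len(uni[0]) columns, minus 1
theorem a_eq_sum (uni : List (List String)) :
    sub_nums uni
      = (uni.map (fun row =>
          (((row.take (PySem.List.pyGetD uni 0 []).length).count "#" : Nat) : Int))).sum := by
  unfold sub_nums
  simp only []
  rw [pyRange_map_range' uni.length, pyRange_map_range' (PySem.List.pyGetD uni 0 []).length]
  have := aOuter_loop uni (PySem.List.pyGetD uni 0 []).length uni.length 0 uni 1
    (by omega) (fun _ _ => rfl)
  rw [this]
  simp

-- replacing one cell removes at most one '#' occurrence
theorem count_set_ge (l : List String) (i : Nat) (v : String) :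
    l.count "#" ≤ (l.set i v).count "#" + 1 := by
  rcases Nat.lt_or_ge i l.length with hi | hi
  · rw [List.set_eq_take_append_cons_drop, if_pos hi]
    conv_lhs => rw [← List.take_append_drop i l,
      (List.getElem_cons_drop (as := l) (i := i) hi).symm]
    simp only [List.count_append, List.count_cons]
    split_ifs <;> omega
  · rw [List.set_eq_of_length_le hi]
    omega

-- k find-and-replace passes advance the label by exactly k when the row holds at least k '#'
theorem bRow_snd (k : Nat) : ∀ (row : List String) (label : Int),
    k ≤ row.count "#" → (bRow k row label).2 = label + k := by
  induction k with
  | zero => intro row label _; simp [bRow]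
  | succ k ih =>
    intro row label hk
    have hmem : "#" ∈ row := List.count_pos_iff.mp (by omega)
    obtain ⟨i, hi⟩ := Option.isSome_iff_exists.mp
      ((PySem.List.index?_isSome_iff (xs := row) (v := "#")).mpr hmem)
    rw [bRow, hi]
    have := count_set_ge row i (PySem.Int.toStr (label + 1))
    rw [ih (row.set i (PySem.Int.toStr (label + 1))) (label + 1) (by omega)]
    push_cast
    ring

-- B's port computes Σ per-row total counts
theorem alt_eq_sum (uni : List (List String)) :
    sub_nums_alt uni = (uni.map (fun row => ((row.count "#" : Nat) : Int))).sum := by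
  unfold sub_nums_alt
  have h : ∀ (l : List (List String)) (label : Int),
      l.foldl (fun label row => (bRow (PySem.List.count row "#") row label).2) label
        = label + (l.map (fun row => ((row.count "#" : Nat) : Int))).sum := by
    intro l
    induction l with
    | nil => intro label; simp
    | cons x xs ih =>
      intro label
      rw [List.foldl_cons, ih]
      rw [PySem.List.count_eq, bRow_snd (x.count "#") x label (le_refl _)]
      simp only [List.map_cons, List.sum_cons]
      ring
  rw [h uni 0]
  ring

-- len(uni[0]) read two ways
theorem headD_eq_pyGetD (uni : List (List String)) :
    uni.headD [] = PySem.List.pyGetD uni 0 [] := by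
  rcases uni with _ | ⟨a, t⟩ <;>
    simp [PySem.List.pyGetD, PySem.List.pyGet?, PySem.List.pyIdx?]

-- per-row split of the total count at column n
theorem count_take_drop (row : List String) (n : Nat) :
    row.count "#" = (row.take n).count "#" + (row.drop n).count "#" := by
  conv_lhs => rw [← List.take_append_drop n row]
  exact List.count_append ..

-- ===== VERDICT (by name: the statements are the Claim_ definitions above) =====
theorem sub_nums_spec : Claim_unchanged_sub_nums := by
  intro uni _ _
  unfold Spec_sub_nums
  intro hnd
  rw [a_eq_sum, alt_eq_sum]
  apply congrArg
  apply List.map_congr_left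
  intro row hrow
  have hno : "#" ∉ row.drop (PySem.List.pyGetD uni 0 []).length := by
    intro hmem
    exact hnd ⟨row, hrow, by rw [headD_eq_pyGetD]; exact hmem⟩
  have : (row.drop (PySem.List.pyGetD uni 0 []).length).count "#" = 0 :=
    List.count_eq_zero.mpr hno
  rw [count_take_drop row (PySem.List.pyGetD uni 0 []).length, this]
  simp

theorem sub_nums_changed : Claim_changed_sub_nums := by
  unfold Claim_changed_sub_nums; decide

theorem sub_nums_tight : Claim_exact_sub_nums := by
  intro uni _ _ hD
  rw [a_eq_sum, alt_eq_sum]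
  apply ne_of_lt
  obtain ⟨row0, hrow0, hmem0⟩ := hD
  rw [headD_eq_pyGetD] at hmem0
  apply List.sum_lt_sum
  · intro row _
    have := count_take_drop row (PySem.List.pyGetD uni 0 []).length
    omega
  · refine ⟨row0, hrow0, ?_⟩
    have hpos : 0 < (row0.drop (PySem.List.pyGetD uni 0 []).length).count "#" :=
      List.count_pos_iff.mpr hmem0
    have := count_take_drop row0 (PySem.List.pyGetD uni 0 []).length
    omega
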